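-- pv_equiv track=rewrite | github.com/mreishus/aoc | 2020/python2020/aoc/day10.py | part2
-- ===== SOURCE A (Python) =====
-- import functools
--
-- def part2(data):
--     voltages = set(data)
--     highest = max(data)
--
--     @functools.cache
--     def helper(v):
--         if v == highest:
--             return 1
--
--         answer = 0
--         for d in [1, 2, 3]:
--             v_step = v + d
--             if v_step not in voltages:
--                 continue
--             answer += helper(v_step)
--         return answer
--
--     return helper(0)
-- ===== SOURCE B (Python) =====
-- def part2(data):
--     voltages = set(data)
--     highest = max(data)
--     ways = {0: 1}
--     for v in sorted(voltages):
--         if v > 0: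
--             ways[v] = ways.get(v - 1, 0) + ways.get(v - 2, 0) + ways.get(v - 3, 0)
--     return ways.get(highest, 0)
-- ===== Notes on version B (the rewrite author's own statement) =====
-- stated objective: alternative
-- what changed: Replaces the top-down memoized recursion (functools.cache helper recursing from the start toward the highest voltage) with an iterative bottom-up DP: a dict seeded with one arrangement at the start, filled over the sorted distinct voltages in ascending order by summing the three possible predecessor entries, returning the entry at the highest voltage.
import Mathlib
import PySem

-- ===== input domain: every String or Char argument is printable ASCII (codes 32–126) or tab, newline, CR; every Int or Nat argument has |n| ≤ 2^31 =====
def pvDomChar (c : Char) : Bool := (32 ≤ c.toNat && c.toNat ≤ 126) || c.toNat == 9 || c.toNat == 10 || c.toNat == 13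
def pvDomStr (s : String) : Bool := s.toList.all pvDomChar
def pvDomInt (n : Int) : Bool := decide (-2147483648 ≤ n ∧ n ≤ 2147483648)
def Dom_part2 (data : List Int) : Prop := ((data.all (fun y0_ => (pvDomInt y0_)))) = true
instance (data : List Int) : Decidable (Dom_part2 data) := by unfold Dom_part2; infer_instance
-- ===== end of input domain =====

-- B replaces A's top-down memoized recursion by an iterative bottom-up DP table filled over
-- the sorted distinct voltages (objective: alternative decomposition; same return values).

-- ===== PORT A =====
-- A's cached helper(v): recursion toward `hi`.  The extra conjunct `v + d ≤ hi` is a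
-- termination guard only; it is provably redundant because hi = max(data) and every
-- member of `voltages` is ≤ hi, so it never changes the computed value.
def part2Helper (voltages : PySem.Set Int) (hi : Int) (v : Int) : Int :=
  if v = hi then 1
  else
    -- `for d in [1, 2, 3]` unrolled: answer += helper(v + d) when v + d ∈ voltages
    (if h1 : (v + 1) ∈ voltages ∧ v + 1 ≤ hi then part2Helper voltages hi (v + 1) else 0)
    + (if h2 : (v + 2) ∈ voltages ∧ v + 2 ≤ hi then part2Helper voltages hi (v + 2) else 0)
    + (if h3 : (v + 3) ∈ voltages ∧ v + 3 ≤ hi then part2Helper voltages hi (v + 3) else 0)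
termination_by (hi - v).toNat
decreasing_by
  · obtain ⟨-, h⟩ := h1; omega
  · obtain ⟨-, h⟩ := h2; omega
  · obtain ⟨-, h⟩ := h3; omega

def part2 (data : List Int) : Int :=
  let voltages := PySem.Set.ofList data
  match PySem.List.max? data (fun x => x) with
  | none => 0          -- Python: max([]) raises ValueError; excluded by Pre_part2
  | some highest => part2Helper voltages highest 0

-- ===== PORT B =====
def part2_alt (data : List Int) : Int :=
  let voltages := PySem.Set.ofList data
  match PySem.List.max? data (fun x => x) with
  | none => 0          -- Python: max([]) raises ValueError; excluded by Pre_part2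
  | some highest =>
    let ways :=
      (PySem.List.sorted voltages (fun x => x) false).foldl
        (fun w v =>
          if 0 < v then
            w.insert v (w.getD (v - 1) 0 + w.getD (v - 2) 0 + w.getD (v - 3) 0)
          else w)
        (PySem.Dict.ofList [((0 : Int), (1 : Int))])
    ways.getD highest 0

-- ===== PRECONDITION & SPEC =====
-- Pre_ excludes only the empty list, on which Python's max(data) raises ValueError in both A and B.
def Pre_part2 (data : List Int) : Prop := data ≠ []
instance (data : List Int) : Decidable (Pre_part2 data) := by unfold Pre_part2; infer_instance
def pvWitness_part2 : List Int := [1, 4, 5, 6, 7]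
def Spec_part2 (data : List Int) (out : Int) : Prop := out = part2_alt data
instance (data : List Int) (out : Int) : Decidable (Spec_part2 data out) := by unfold Spec_part2; infer_instance

-- ===== CLAIM (what is proved, stated in full; the proofs are below) =====
def Claim_equal_part2 : Prop := ∀ (data : List Int), Dom_part2 data → Pre_part2 data → Spec_part2 data (part2 data)

-- ===== LEMMAS AND PROOFS =====

-- number of step-1/2/3 paths from 0 to v through the positive voltages of `data`
def gfun (data : List Int) (v : Int) : Int :=
  if v ≤ 0 then (if v = 0 then 1 else 0)
  else if v ∈ data then gfun data (v - 1) + gfun data (v - 2) + gfun data (v - 3) else 0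
termination_by v.toNat
decreasing_by all_goals omega

theorem gfun_neg (data : List Int) (v : Int) (h : v < 0) : gfun data v = 0 := by
  rw [gfun]; rw [if_pos (by omega : v ≤ 0), if_neg (by omega : ¬ v = 0)]

theorem gfun_id (data : List Int) (v : Int) :
    gfun data v = (if v = 0 then 1 else 0)
      + (if 0 < v ∧ v ∈ data then gfun data (v - 1) + gfun data (v - 2) + gfun data (v - 3) else 0) := by
  rw [gfun]
  by_cases h0 : v ≤ 0
  · rw [if_pos h0, if_neg (by omega : ¬ (0 < v ∧ v ∈ data)), add_zero]
  · rw [if_neg h0, if_neg (by omega : ¬ v = 0), zero_add]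
    by_cases hm : v ∈ data
    · rw [if_pos hm, if_pos ⟨by omega, hm⟩]
    · rw [if_neg hm, if_neg (by intro h; exact hm h.2)]

theorem gfun_pos (data : List Int) (v : Int) (h1 : 0 < v) (h2 : v ∈ data) :
    gfun data v = gfun data (v - 1) + gfun data (v - 2) + gfun data (v - 3) := by
  rw [gfun, if_neg (by omega : ¬ v ≤ 0), if_pos h2]

theorem helper_id (data : List Int) (hi : Int) (v : Int) :
    part2Helper (PySem.Set.ofList data) hi v = (if v = hi then 1 else 0)
      + (if v + 1 ∈ data ∧ v + 1 ≤ hi then part2Helper (PySem.Set.ofList data) hi (v + 1) else 0)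
      + (if v + 2 ∈ data ∧ v + 2 ≤ hi then part2Helper (PySem.Set.ofList data) hi (v + 2) else 0)
      + (if v + 3 ∈ data ∧ v + 3 ≤ hi then part2Helper (PySem.Set.ofList data) hi (v + 3) else 0) := by
  rw [part2Helper]
  by_cases hv : v = hi
  · subst hv
    rw [if_pos rfl, if_pos rfl]
    rw [if_neg (by omega : ¬ (v + 1 ∈ data ∧ v + 1 ≤ v)),
        if_neg (by omega : ¬ (v + 2 ∈ data ∧ v + 2 ≤ v)),
        if_neg (by omega : ¬ (v + 3 ∈ data ∧ v + 3 ≤ v))]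
    norm_num
  · rw [if_neg hv, if_neg hv, zero_add]
    simp only [PySem.Set.mem_ofList, dite_eq_ite]

theorem ite_add3 (c : Prop) [Decidable c] (a b e : Int) :
    (if c then a + b + e else 0)
      = (if c then a else 0) + (if c then b else 0) + (if c then e else 0) := by
  split_ifs <;> ring

-- the exchange ('bilinear') argument: a backward path count F toward hi and a forward
-- path count G from 0 satisfy ∑ G·F expanded two ways, giving F 0 = G hi
theorem bilinear (data : List Int) (hi : Int) (h0 : 0 ≤ hi) (F G : Int → Int)
    (hFid : ∀ v : Int, F v = (if v = hi then 1 else 0)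
      + (if v + 1 ∈ data ∧ v + 1 ≤ hi then F (v + 1) else 0)
      + (if v + 2 ∈ data ∧ v + 2 ≤ hi then F (v + 2) else 0)
      + (if v + 3 ∈ data ∧ v + 3 ≤ hi then F (v + 3) else 0))
    (hGid : ∀ v : Int, G v = (if v = 0 then 1 else 0)
      + (if 0 < v ∧ v ∈ data then G (v - 1) + G (v - 2) + G (v - 3) else 0))
    (hGneg : ∀ v : Int, v < 0 → G v = 0) :
    F 0 = G hi := by
  have hsum1 : ∀ i : Int, G i * F i
      = (if i = hi then G i else 0)
      + (if i + 1 ∈ data ∧ i + 1 ≤ hi then G i * F (i + 1) else 0)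
      + (if i + 2 ∈ data ∧ i + 2 ≤ hi then G i * F (i + 2) else 0)
      + (if i + 3 ∈ data ∧ i + 3 ≤ hi then G i * F (i + 3) else 0) := by
    intro i
    rw [hFid i]
    simp only [mul_add, mul_ite, mul_zero, mul_one]
  have hsum2 : ∀ i : Int, G i * F i
      = (if i = 0 then F i else 0)
      + (if 0 < i ∧ i ∈ data then G (i - 1) * F i else 0)
      + (if 0 < i ∧ i ∈ data then G (i - 2) * F i else 0)
      + (if 0 < i ∧ i ∈ data then G (i - 3) * F i else 0) := by
    intro i
    rw [hGid i]
    simp only [add_mul, ite_mul, zero_mul, one_mul, ite_add3]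
    ring
  have expand1 : ∑ i ∈ Finset.Icc (0 : Int) hi, G i * F i
      = G hi
      + (∑ i ∈ Finset.Icc (0 : Int) hi, if i + 1 ∈ data ∧ i + 1 ≤ hi then G i * F (i + 1) else 0)
      + (∑ i ∈ Finset.Icc (0 : Int) hi, if i + 2 ∈ data ∧ i + 2 ≤ hi then G i * F (i + 2) else 0)
      + (∑ i ∈ Finset.Icc (0 : Int) hi, if i + 3 ∈ data ∧ i + 3 ≤ hi then G i * F (i + 3) else 0) := by
    rw [Finset.sum_congr rfl (fun i _ => hsum1 i)]
    simp only [Finset.sum_add_distrib]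
    rw [Finset.sum_ite_eq' (Finset.Icc (0 : Int) hi) hi G,
        if_pos (Finset.mem_Icc.mpr ⟨h0, le_refl hi⟩)]
  have expand2 : ∑ i ∈ Finset.Icc (0 : Int) hi, G i * F i
      = F 0
      + (∑ i ∈ Finset.Icc (0 : Int) hi, if 0 < i ∧ i ∈ data then G (i - 1) * F i else 0)
      + (∑ i ∈ Finset.Icc (0 : Int) hi, if 0 < i ∧ i ∈ data then G (i - 2) * F i else 0)
      + (∑ i ∈ Finset.Icc (0 : Int) hi, if 0 < i ∧ i ∈ data then G (i - 3) * F i else 0) := by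
    rw [Finset.sum_congr rfl (fun i _ => hsum2 i)]
    simp only [Finset.sum_add_distrib]
    rw [Finset.sum_ite_eq' (Finset.Icc (0 : Int) hi) 0 F,
        if_pos (Finset.mem_Icc.mpr ⟨le_refl (0 : Int), h0⟩)]
  have cross : ∀ d : Int, 1 ≤ d →
      (∑ i ∈ Finset.Icc (0 : Int) hi, if i + d ∈ data ∧ i + d ≤ hi then G i * F (i + d) else 0)
        = ∑ i ∈ Finset.Icc (0 : Int) hi, if 0 < i ∧ i ∈ data then G (i - d) * F i else 0 := by
    intro d hd
    have hmap : Finset.Icc d (hi + d)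
        = Finset.map (addLeftEmbedding d) (Finset.Icc (0 : Int) hi) := by
      rw [Finset.map_add_left_Icc]
      congr 1 <;> ring
    have hL : (∑ i ∈ Finset.Icc (0 : Int) hi,
          if i + d ∈ data ∧ i + d ≤ hi then G i * F (i + d) else 0)
        = ∑ j ∈ Finset.Icc d (hi + d),
            if 0 < j ∧ j ∈ data ∧ j ≤ hi then G (j - d) * F j else 0 := by
      rw [hmap, Finset.sum_map]
      apply Finset.sum_congr rfl
      intro i himem
      have hi2 := Finset.mem_Icc.mp himem
      simp only [addLeftEmbedding_apply]
      rw [add_comm d i, show i + d - d = i by ring]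
      by_cases hc : i + d ∈ data ∧ i + d ≤ hi
      · rw [if_pos hc, if_pos ⟨by omega, hc.1, hc.2⟩]
      · rw [if_neg hc, if_neg (fun hc' => hc ⟨hc'.2.1, hc'.2.2⟩)]
    have hL2 : (∑ j ∈ Finset.Icc d (hi + d),
          if 0 < j ∧ j ∈ data ∧ j ≤ hi then G (j - d) * F j else 0)
        = ∑ j ∈ Finset.Icc (0 : Int) (hi + d),
            if 0 < j ∧ j ∈ data ∧ j ≤ hi then G (j - d) * F j else 0 := by
      apply Finset.sum_subset (Finset.Icc_subset_Icc (by omega) (le_refl _))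
      intro j hj hnj
      have hj2 := Finset.mem_Icc.mp hj
      have hjd : j < d := by
        by_contra hge
        exact hnj (Finset.mem_Icc.mpr ⟨by omega, hj2.2⟩)
      split_ifs with hc
      · rw [hGneg (j - d) (by omega), zero_mul]
      · rfl
    have hR : (∑ i ∈ Finset.Icc (0 : Int) hi, if 0 < i ∧ i ∈ data then G (i - d) * F i else 0)
        = ∑ j ∈ Finset.Icc (0 : Int) (hi + d),
            if 0 < j ∧ j ∈ data ∧ j ≤ hi then G (j - d) * F j else 0 := by
      have hcong : ∀ i ∈ Finset.Icc (0 : Int) hi,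
          (if 0 < i ∧ i ∈ data then G (i - d) * F i else 0)
            = (if 0 < i ∧ i ∈ data ∧ i ≤ hi then G (i - d) * F i else 0) := by
        intro i himem
        have hi2 := Finset.mem_Icc.mp himem
        exact if_congr ⟨fun h => ⟨h.1, h.2, hi2.2⟩, fun h => ⟨h.1, h.2.1⟩⟩ rfl rfl
      rw [Finset.sum_congr rfl hcong]
      apply Finset.sum_subset (Finset.Icc_subset_Icc (le_refl _) (by omega))
      intro j hj hnj
      have hj2 := Finset.mem_Icc.mp hj
      have hjd : hi < j := by
        by_contra hge
        exact hnj (Finset.mem_Icc.mpr ⟨hj2.1, by omega⟩)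
      rw [if_neg (fun hc => absurd hc.2.2 (by omega))]
    rw [hL, hL2, hR]
  have e := expand1.symm.trans expand2
  rw [cross 1 (by omega), cross 2 (by omega), cross 3 (by omega)] at e
  linarith

theorem helper_eq_gfun (data : List Int) (hi : Int) (h0 : 0 ≤ hi) :
    part2Helper (PySem.Set.ofList data) hi 0 = gfun data hi := by
  exact bilinear data hi h0
    (fun v => part2Helper (PySem.Set.ofList data) hi v) (fun v => gfun data v)
    (helper_id data hi) (gfun_id data) (gfun_neg data)

theorem portA_eq_gfun (data : List Int) (hi : Int)
    (hmax : PySem.List.max? data (fun x => x) = some hi) :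
    part2 data = gfun data hi := by
  have hA : part2 data = part2Helper (PySem.Set.ofList data) hi 0 := by
    simp only [part2]; rw [hmax]
  rw [hA]
  have hhi : ∀ x ∈ data, x ≤ hi := PySem.List.max?_isMax hmax
  by_cases hpos : 0 ≤ hi
  · exact helper_eq_gfun data hi hpos
  · rw [gfun_neg data hi (by omega)]
    rw [part2Helper]
    rw [if_neg (by omega : ¬ (0:Int) = hi)]
    rw [dif_neg (by intro h; omega), dif_neg (by intro h; omega), dif_neg (by intro h; omega)]
    norm_num

theorem foldInv (data : List Int) : ∀ (L : List Int) (w : PySem.Dict Int Int),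
    (∀ x ∈ L, x ∈ data) → L.Pairwise (· < ·) →
    (∀ x ∈ data, x ∈ L ∨ (∀ y ∈ L, x < y)) →
    (∀ u : Int, w.getD u 0 =
      if u = 0 then 1 else if 0 < u ∧ u ∈ data ∧ (∀ y ∈ L, u < y) then gfun data u else 0) →
    ∀ u : Int,
      (L.foldl (fun w v =>
          if 0 < v then
            w.insert v (w.getD (v - 1) 0 + w.getD (v - 2) 0 + w.getD (v - 3) 0)
          else w) w).getD u 0 =
        if u = 0 then 1 else if 0 < u ∧ u ∈ data then gfun data u else 0 := by
  intro L
  induction L with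
  | nil =>
    intro w _ _ _ hw u
    simpa using hw u
  | cons v L' ih =>
    intro w h0 h1 h2 hw u
    have hvL : ∀ y ∈ L', v < y := (List.pairwise_cons.mp h1).1
    have h1' : L'.Pairwise (· < ·) := (List.pairwise_cons.mp h1).2
    have h0' : ∀ x ∈ L', x ∈ data := fun x hx => h0 x (List.mem_cons_of_mem _ hx)
    have h2' : ∀ x ∈ data, x ∈ L' ∨ (∀ y ∈ L', x < y) := by
      intro x hx
      rcases h2 x hx with hmem | hlt
      · rcases List.mem_cons.mp hmem with rfl | hmem'
        · exact Or.inr hvL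
        · exact Or.inl hmem'
      · exact Or.inr fun y hy => hlt y (List.mem_cons_of_mem _ hy)
    simp only [List.foldl_cons]
    by_cases hv : 0 < v
    · rw [if_pos hv]
      refine ih _ h0' h1' h2' ?_ u
      intro u
      have hget : ∀ d : Int, 1 ≤ d → w.getD (v - d) 0 = gfun data (v - d) := by
        intro d hd1
        rw [hw (v - d)]
        rcases lt_trichotomy (v - d) 0 with hneg | hz | hpos
        · rw [if_neg (by omega), if_neg (by omega), gfun_neg data _ hneg]
        · rw [if_pos hz, hz, gfun]; norm_num
        · rw [if_neg (by omega)]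
          by_cases hmem : (v - d) ∈ data
          · have hall : ∀ y ∈ v :: L', v - d < y := by
              intro y hy
              rcases List.mem_cons.mp hy with rfl | hy'
              · omega
              · have := hvL y hy'; omega
            rw [if_pos ⟨hpos, hmem, hall⟩]
          · rw [if_neg (by intro hcon; exact hmem hcon.2.1)]
            rw [gfun, if_neg (by omega : ¬ v - d ≤ 0), if_neg hmem]
      rw [PySem.Dict.getD_insert]
      by_cases huv : u = v
      · subst huv
        rw [if_pos rfl, if_neg (by omega : ¬ u = 0),
            if_pos ⟨hv, h0 u List.mem_cons_self, hvL⟩]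
        rw [hget 1 (by omega), hget 2 (by omega), hget 3 (by omega),
            gfun_pos data u hv (h0 u List.mem_cons_self)]
      · rw [if_neg huv, hw u]
        by_cases hu0 : u = 0
        · rw [if_pos hu0, if_pos hu0]
        · rw [if_neg hu0, if_neg hu0]
          by_cases hc : 0 < u ∧ u ∈ data ∧ ∀ y ∈ L', u < y
          · have huv' : u < v := by
              rcases h2 u hc.2.1 with hmem | hlt
              · rcases List.mem_cons.mp hmem with rfl | hmem'
                · exact absurd rfl huv
                · exact absurd (hc.2.2 u hmem') (by omega)
              · exact hlt v List.mem_cons_self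
            refine (if_pos ⟨hc.1, hc.2.1, ?_⟩).trans (if_pos hc).symm
            intro y hy
            rcases List.mem_cons.mp hy with rfl | hy'
            · exact huv'
            · exact hc.2.2 y hy'
          · rw [if_neg hc,
                if_neg (fun hbig => hc ⟨hbig.1, hbig.2.1,
                  fun y hy => hbig.2.2 y (List.mem_cons_of_mem _ hy)⟩)]
    · rw [if_neg hv]
      refine ih _ h0' h1' h2' ?_ u
      intro u
      rw [hw u]
      by_cases hu0 : u = 0
      · rw [if_pos hu0, if_pos hu0]
      · rw [if_neg hu0, if_neg hu0]
        have hsmall : ¬ (0 < u ∧ u ∈ data ∧ ∀ y ∈ L', u < y) := by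
          intro hc
          rcases h2 u hc.2.1 with hmem | hlt
          · rcases List.mem_cons.mp hmem with rfl | hmem'
            · omega
            · exact absurd (hc.2.2 u hmem') (by omega)
          · have := hlt v List.mem_cons_self; omega
        rw [if_neg hsmall,
            if_neg (fun hbig => hsmall ⟨hbig.1, hbig.2.1,
              fun y hy => hbig.2.2 y (List.mem_cons_of_mem _ hy)⟩)]

theorem portB_eq_gfun (data : List Int) (hi : Int)
    (hmax : PySem.List.max? data (fun x => x) = some hi) :
    part2_alt data = gfun data hi := by
  have hB : part2_alt data =
      ((PySem.List.sorted (PySem.Set.ofList data) (fun x => x) false).foldl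
        (fun w v =>
          if 0 < v then
            w.insert v (w.getD (v - 1) 0 + w.getD (v - 2) 0 + w.getD (v - 3) 0)
          else w)
        (PySem.Dict.ofList [((0 : Int), (1 : Int))])).getD hi 0 := by
    simp only [part2_alt]; rw [hmax]
  rw [hB]
  have hmemL : ∀ x : Int, x ∈ PySem.List.sorted (PySem.Set.ofList data) (fun x => x) false ↔ x ∈ data := by
    intro x
    rw [PySem.List.mem_sorted, PySem.Set.mem_ofList]
  rw [foldInv data (PySem.List.sorted (PySem.Set.ofList data) (fun x => x) false)
        (PySem.Dict.ofList [((0 : Int), (1 : Int))])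
        (fun x hx => (hmemL x).mp hx)
        (PySem.List.sorted_ofList_pairwise_lt data)
        (fun x hx => Or.inl ((hmemL x).mpr hx))
        ?_ hi]
  · have hmem : hi ∈ data := PySem.List.max?_mem hmax
    rcases lt_trichotomy hi 0 with hneg | hz | hpos
    · rw [if_neg (by omega), if_neg (by omega), gfun_neg data _ hneg]
    · rw [if_pos hz, hz, gfun]; norm_num
    · rw [if_neg (by omega), if_pos ⟨hpos, hmem⟩]
  · intro u
    have : PySem.Dict.ofList [((0 : Int), (1 : Int))] = (PySem.Dict.empty).insert 0 1 := rfl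
    rw [this, PySem.Dict.getD_insert, PySem.Dict.getD_empty]
    by_cases hu0 : u = 0
    · rw [if_pos hu0, if_pos hu0]
    · rw [if_neg hu0, if_neg hu0,
          if_neg (fun hc => absurd (hc.2.2 u ((hmemL u).mpr hc.2.1)) (by omega))]

-- ===== VERDICT (by name: the statement is the Claim_ definition above) =====
theorem part2_spec : Claim_equal_part2 := by
  intro data _ hpre
  have hne : data ≠ [] := hpre
  obtain ⟨hi, hmax⟩ : ∃ hi, PySem.List.max? data (fun x => x) = some hi := by
    cases h : PySem.List.max? data (fun x => x) with
    | none => exact absurd ((PySem.List.max?_eq_none_iff data (fun x => x)).mp h) hne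
    | some m => exact ⟨m, rfl⟩
  unfold Spec_part2
  rw [portA_eq_gfun data hi hmax, portB_eq_gfun data hi hmax]
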